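-- pv_equiv track=rewrite | github.com/Thunder2103/Advent-Of-Code | 2024/code/day_9.py | process_free_spaces
-- ===== SOURCE A (Python) =====
-- def process_free_spaces(free_spaces):
--     split_free_spaces = []
--     l, r, n = 0, 1, len(free_spaces)
--     while(r <= n):
--         if(r == n or free_spaces[r] - free_spaces[r - 1] != 1):
--             split_free_spaces.append(free_spaces[l:r])
--             l = r
--         r += 1
--     return split_free_spaces
-- ===== SOURCE B (Python) =====
-- from itertools import groupby
--
-- def process_free_spaces(free_spaces):
--     split_free_spaces = []
--     for _, group in groupby(enumerate(free_spaces), key=lambda iv: iv[1] - iv[0]):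
--         split_free_spaces.append([v for _, v in group])
--     return split_free_spaces
-- ===== Notes on version B (the rewrite author's own statement) =====
-- stated objective: idiomatic
-- what changed: Replaced the l/r pointer-and-slice while loop with itertools.groupby over enumerate, keyed by value-minus-index so consecutive runs share one key.
import Mathlib
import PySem

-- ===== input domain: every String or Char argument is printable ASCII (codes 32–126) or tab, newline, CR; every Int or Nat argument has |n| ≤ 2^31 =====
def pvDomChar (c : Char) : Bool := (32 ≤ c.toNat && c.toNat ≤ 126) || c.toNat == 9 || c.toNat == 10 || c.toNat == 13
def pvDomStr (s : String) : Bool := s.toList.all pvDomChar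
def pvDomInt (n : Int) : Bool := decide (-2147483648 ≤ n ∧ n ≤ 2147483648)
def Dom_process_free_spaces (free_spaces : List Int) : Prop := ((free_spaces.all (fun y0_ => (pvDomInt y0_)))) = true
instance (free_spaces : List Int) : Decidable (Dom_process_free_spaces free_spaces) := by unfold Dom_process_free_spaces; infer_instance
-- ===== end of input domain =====

-- B replaces A's l/r pointer-and-slice while loop with a single grouping pass keyed by value-minus-index (itertools.groupby); objective: more idiomatic.

-- ===== PORT A =====
-- the while(r <= n) loop, state (l, acc), r advancing by 1 each iteration
def pfsLoop (fs : List Int) (n : Nat) (l r : Nat) (acc : List (List Int)) : List (List Int) :=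
  if r ≤ n then
    if r = n ∨ (PySem.List.pyGet? fs (r : Int)).getD 0 - (PySem.List.pyGet? fs ((r : Int) - 1)).getD 0 ≠ 1 then
      pfsLoop fs n r (r + 1) (acc ++ [PySem.List.slice fs (some (l : Int)) (some (r : Int))])
    else
      pfsLoop fs n l (r + 1) acc
  else acc
termination_by n + 1 - r

def process_free_spaces (free_spaces : List Int) : List (List Int) :=
  pfsLoop free_spaces free_spaces.length 0 1 []

-- ===== PORT B =====
-- one groupby group in progress: key k, current group collected in reverse in cur
def pfsGroup (k : Int) (cur : List Int) : List (Int × Int) → List (List Int)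
  | [] => [cur.reverse]
  | (i, v) :: rest =>
      if v - i = k then pfsGroup k (v :: cur) rest
      else cur.reverse :: pfsGroup (v - i) [v] rest

def process_free_spaces_alt (free_spaces : List Int) : List (List Int) :=
  match PySem.List.enumerate free_spaces with
  | [] => []
  | (i, v) :: rest => pfsGroup (v - i) [v] rest

-- ===== PRECONDITION & SPEC =====
def Spec_process_free_spaces (free_spaces : List Int) (out : List (List Int)) : Prop := out = process_free_spaces_alt free_spaces
instance (free_spaces : List Int) (out : List (List Int)) : Decidable (Spec_process_free_spaces free_spaces out) := by unfold Spec_process_free_spaces; infer_instance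

-- ===== CLAIM (what is proved, stated in full; the proofs are below) =====
def Claim_equal_process_free_spaces : Prop := ∀ (free_spaces : List Int), Dom_process_free_spaces free_spaces → Spec_process_free_spaces free_spaces (process_free_spaces free_spaces)

-- ===== LEMMAS AND PROOFS =====

-- appending the next element to the slice in progress
lemma slice_snoc (fs : List Int) (l r : Nat) (hl : l ≤ r) (hr : r < fs.length) :
    PySem.List.slice fs (some (l : Int)) (some ((r + 1 : Nat) : Int)) =
      PySem.List.slice fs (some (l : Int)) (some (r : Int)) ++ [fs[r]] := by
  rw [PySem.List.slice_natCast, PySem.List.slice_natCast]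
  have h1 : r + 1 - l = (r - l) + 1 := by omega
  have h2 : l + (r - l) = r := by omega
  rw [h1, List.take_add_one, List.getElem?_drop, h2, List.getElem?_eq_getElem hr]
  rfl

-- the main invariant: the while loop from state (l, r, acc) equals acc ++ the groupby
-- continuation with key k, current group fs[l:r] (reversed), remaining enumerated suffix
lemma pfsLoop_eq_group (fs : List Int) :
    ∀ (m l r : Nat) (acc : List (List Int)) (k : Int),
      fs.length - r = m → l < r → r ≤ fs.length →
      k = (fs[r - 1]?.getD 0) - ((r - 1 : Nat) : Int) →
      pfsLoop fs fs.length l r acc =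
        acc ++ pfsGroup k (PySem.List.slice fs (some (l : Int)) (some (r : Int))).reverse
          (PySem.List.enumerate (fs.drop r) (r : Int)) := by
  intro m
  induction m with
  | zero =>
      intro l r acc k hm hlr hr hk
      have hrn : r = fs.length := by omega
      subst hrn
      rw [pfsLoop, if_pos le_rfl, if_pos (Or.inl rfl), pfsLoop, if_neg (by omega),
        List.drop_length, PySem.List.enumerate_nil]
      simp [pfsGroup]
  | succ m ih =>
      intro l r acc k hm hlr hr hk
      have hrlt : r < fs.length := by omega
      have hr1 : r - 1 < fs.length := by omega
      -- the pyGet? indices in the loop body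
      have hget_r : (PySem.List.pyGet? fs (r : Int)).getD 0 = fs[r] := by
        rw [PySem.List.pyGet?_natCast, List.getElem?_eq_getElem hrlt]; rfl
      have hcast : (r : Int) - 1 = ((r - 1 : Nat) : Int) := by omega
      have hget_r1 : (PySem.List.pyGet? fs ((r : Int) - 1)).getD 0 = fs[r - 1] := by
        rw [hcast, PySem.List.pyGet?_natCast, List.getElem?_eq_getElem hr1]; rfl
      have hk' : k = fs[r - 1] - ((r - 1 : Nat) : Int) := by
        rw [hk, List.getElem?_eq_getElem hr1]; rfl
      -- the enumerated suffix exposes its head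
      have hdrop : fs.drop r = fs[r] :: fs.drop (r + 1) := List.drop_eq_getElem_cons hrlt
      have hstep : ((r : Int) + 1) = ((r + 1 : Nat) : Int) := by push_cast; ring
      have hsuffix : PySem.List.enumerate (fs.drop r) (r : Int) =
          ((r : Int), fs[r]) :: PySem.List.enumerate (fs.drop (r + 1)) ((r + 1 : Nat) : Int) := by
        rw [hdrop, PySem.List.enumerate_cons, hstep]
      -- A's split test agrees with B's key test
      have hcond : fs[r] - fs[r - 1] = 1 ↔ fs[r] - (r : Int) = k := by
        rw [hk']; omega
      have hrn : r ≠ fs.length := by omega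
      rw [pfsLoop, if_pos hr]
      by_cases hdiff : fs[r] - fs[r - 1] = 1
      · -- same run continues
        rw [if_neg (by rw [hget_r, hget_r1]; simp [hrn, hdiff])]
        rw [ih l (r + 1) acc k (by omega) (by omega) (by omega)
          (by simp [List.getElem?_eq_getElem hrlt]; omega)]
        rw [hsuffix, slice_snoc fs l r (by omega) hrlt]
        have hkey : fs[r] - (r : Int) = k := hcond.mp hdiff
        simp [pfsGroup, hkey]
      · -- run breaks here
        rw [if_pos (by rw [hget_r, hget_r1]; exact Or.inr hdiff)]
        rw [ih r (r + 1) (acc ++ [PySem.List.slice fs (some (l : Int)) (some (r : Int))])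
          (fs[r] - (r : Int)) (by omega) (by omega) (by omega)
          (by simp [List.getElem?_eq_getElem hrlt])]
        rw [hsuffix]
        have hkey : ¬ (fs[r] - (r : Int) = k) := fun h => hdiff (hcond.mpr h)
        have hslice1 : (PySem.List.slice fs (some ((r : Nat) : Int)) (some ((r : Int) + 1))).reverse = [fs[r]] := by
          rw [hstep, slice_snoc fs r r (le_refl r) hrlt, PySem.List.slice_natCast]
          simp
        simp [pfsGroup, hkey, hslice1, List.append_assoc]

-- ===== VERDICT (by name: the statement is the Claim_ definition above) =====
theorem process_free_spaces_spec : Claim_equal_process_free_spaces := by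
  intro fs _
  show process_free_spaces fs = process_free_spaces_alt fs
  cases fs with
  | nil =>
      show pfsLoop [] ([] : List Int).length 0 1 [] = process_free_spaces_alt []
      rw [pfsLoop]
      rfl
  | cons x xs =>
      show pfsLoop (x :: xs) (x :: xs).length 0 1 [] = process_free_spaces_alt (x :: xs)
      rw [pfsLoop_eq_group (x :: xs) xs.length 0 1 [] (x - 0)
        (by simp) (by omega) (by simp) (by simp)]
      have h1 : PySem.List.slice (x :: xs) none (some 1) = [x] := by
        rw [show (1 : Int) = ((1 : Nat) : Int) from rfl, PySem.List.slice_to_natCast]; rfl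
      simp [process_free_spaces_alt, PySem.List.enumerate_cons, h1]
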